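-- pv_equiv track=rewrite | github.com/xiaojia21190/poco-agent | backend/app/services/im_feishu_event_parser.py | _extract_leading_plain_mentions
-- ===== SOURCE A (Python) =====
-- def _extract_leading_plain_mentions(text: str) -> list[dict[str, str]]:
--     items: list[dict[str, str]] = []
--     remaining = text
--     while True:
--         if not remaining.startswith(("@", "\uff20")):
--             break
--         parts = remaining.split(maxsplit=1)
--         token = parts[0]
--         mention_name = _normalize_name(token[1:])
--         items.append({"name": mention_name, "ids": ""})
--         if len(parts) == 1:
--             break
--         remaining = parts[1].strip()
--     return items
--
-- def _normalize_name(value: str) -> str: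
--     return (value or "").strip().casefold()
-- ===== SOURCE B (Python) =====
-- def _extract_leading_plain_mentions(text: str) -> list[dict[str, str]]:
--     # Tokenize once and scan the prefix of @-tokens; the guard keeps A's
--     # leading-whitespace behaviour (prefix is tested on the unstripped text).
--     if not text.startswith(("@", "\uff20")):
--         return []
--     items: list[dict[str, str]] = []
--     for token in text.split():
--         if not token.startswith(("@", "\uff20")):
--             break
--         items.append({"name": _normalize_name(token[1:]), "ids": ""})
--     return items
--
-- def _normalize_name(value: str) -> str:
--     return (value or "").strip().casefold()
-- ===== Notes on version B (the rewrite author's own statement) =====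
-- stated objective: simpler
-- what changed: B tokenizes the text once with text.split() and walks the token list in a single for-loop with a break, instead of A's while-loop that re-splits and re-strips the shrinking remainder on every iteration; a startswith guard on the unstripped text keeps A's leading-whitespace behaviour.
import Mathlib
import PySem

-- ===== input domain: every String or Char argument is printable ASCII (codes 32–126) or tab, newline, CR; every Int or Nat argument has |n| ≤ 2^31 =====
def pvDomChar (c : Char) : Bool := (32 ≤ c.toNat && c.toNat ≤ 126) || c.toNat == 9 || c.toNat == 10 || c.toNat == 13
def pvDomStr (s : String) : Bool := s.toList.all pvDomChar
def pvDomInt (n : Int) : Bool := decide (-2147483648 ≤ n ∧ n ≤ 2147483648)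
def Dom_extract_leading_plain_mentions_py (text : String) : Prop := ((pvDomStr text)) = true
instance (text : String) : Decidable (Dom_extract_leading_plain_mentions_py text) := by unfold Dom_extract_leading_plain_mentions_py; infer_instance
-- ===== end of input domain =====

-- B tokenizes the text once with str.split() and scans the prefix of @-tokens,
-- replacing A's loop that re-splits and re-strips the remainder each iteration (objective: simpler).


-- ===== PORT A =====
-- shared module helper `_normalize_name(value) = (value or "").strip().casefold()`;
-- `value or ""` is the identity on str, and casefold is ported as lower (exact on the ASCII domain)
def pvNormalizeName (v : List Char) : String :=
  String.ofList (PySem.Chars.lower (PySem.Chars.strip v))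

-- the dict {"name": _normalize_name(token[1:]), "ids": ""} appended by both Pythons; token[1:] = drop 1
def pvMentionItem (tok : List Char) : List (String × String) :=
  [("name", pvNormalizeName (tok.drop 1)), ("ids", "")]

-- s.startswith(("@", "\uff20")), used by both Pythons
def pvStartsMention (cs : List Char) : Bool :=
  PySem.Chars.startswith cs ['@'] || PySem.Chars.startswith cs ['＠']

-- shape of split(maxsplit=1) on a string whose head is not whitespace (used by pvALoop's termination and the proofs)
lemma pvSplit1_spec (c : Char) (cs : List Char) (hc : PySem.Chars.isspace c = false) :
    PySem.Chars.split₀Max (c :: cs) 1 =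
      (c :: cs.takeWhile (fun x => !PySem.Chars.isspace x)) ::
        (if PySem.Chars.lstrip (cs.dropWhile (fun x => !PySem.Chars.isspace x)) = [] then []
         else [PySem.Chars.lstrip (cs.dropWhile (fun x => !PySem.Chars.isspace x))]) := by
  unfold PySem.Chars.lstrip
  cases h : List.dropWhile PySem.Chars.isspace (cs.dropWhile (fun x => !PySem.Chars.isspace x)) with
  | nil =>
    unfold PySem.Chars.split₀Max
    rw [if_neg (by norm_num)]
    rw [PySem.Chars.split₀Max.go.eq_def]
    simp [hc]
    rw [PySem.Chars.split₀Max.go.eq_def]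
    simp [h]
  | cons a l =>
    unfold PySem.Chars.split₀Max
    rw [if_neg (by norm_num)]
    rw [PySem.Chars.split₀Max.go.eq_def]
    simp [hc]
    rw [PySem.Chars.split₀Max.go.eq_def]
    simp [h]

lemma pvStartsMention_head (c : Char) (cs : List Char) (h : pvStartsMention (c :: cs) = true) :
    PySem.Chars.isspace c = false ∧ (c = '@' ∨ c = '＠') := by
  simp only [pvStartsMention, PySem.Chars.startswith, List.isPrefixOf, Bool.or_eq_true,
    Bool.and_eq_true, beq_iff_eq] at h
  rcases h with ⟨h, -⟩ | ⟨h, -⟩ <;> subst h <;> exact ⟨by decide, by simp⟩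

lemma pvStripLen (x : List Char) : (PySem.Chars.strip x).length ≤ x.length := by
  unfold PySem.Chars.strip PySem.Chars.rstrip PySem.Chars.lstrip
  simp only [List.length_reverse]
  calc (List.dropWhile PySem.Chars.isspace (List.dropWhile PySem.Chars.isspace x).reverse).length
      ≤ (List.dropWhile PySem.Chars.isspace x).reverse.length := List.length_dropWhile_le _ _
    _ = (List.dropWhile PySem.Chars.isspace x).length := List.length_reverse ..
    _ ≤ x.length := List.length_dropWhile_le _ _

lemma pvSplit1_decrease (c : Char) (cs : List Char) (hc : PySem.Chars.isspace c = false) :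
    (PySem.Chars.strip ((PySem.Chars.split₀Max (c :: cs) 1).getD 1 [])).length < (c :: cs).length := by
  rw [pvSplit1_spec c cs hc]
  split
  · simp [PySem.Chars.strip, PySem.Chars.rstrip, PySem.Chars.lstrip]
  · simp only [List.getD_cons_succ, List.getD_cons_zero, List.length_cons]
    calc (PySem.Chars.strip (PySem.Chars.lstrip (cs.dropWhile (fun x => !PySem.Chars.isspace x)))).length
        ≤ (PySem.Chars.lstrip (cs.dropWhile (fun x => !PySem.Chars.isspace x))).length := pvStripLen _
      _ ≤ (cs.dropWhile (fun x => !PySem.Chars.isspace x)).length := List.length_dropWhile_le _ _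
      _ ≤ cs.length := List.length_dropWhile_le _ _
      _ < cs.length + 1 := Nat.lt_succ_self _

-- A's while-loop over `remaining`
def pvALoop (remaining : List Char) : List (List (String × String)) :=
  if h : pvStartsMention remaining = true then
    let parts := PySem.Chars.split₀Max remaining 1
    let token := parts.headD []
    let item := pvMentionItem token
    if parts.length = 1 then [item]
    else item :: pvALoop (PySem.Chars.strip (parts.getD 1 []))
  else []
termination_by remaining.length
decreasing_by
  cases remaining with
  | nil => simp [pvStartsMention, PySem.Chars.startswith] at h
  | cons c cs => exact pvSplit1_decrease c cs (pvStartsMention_head c cs h).1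

def extract_leading_plain_mentions_py (text : String) : List (List (String × String)) :=
  pvALoop text.toList

-- ===== PORT B =====
-- the for-loop over text.split() with its break
def pvBScan : List (List Char) → List (List (String × String))
  | [] => []
  | tok :: rest =>
    if pvStartsMention tok = true then pvMentionItem tok :: pvBScan rest else []

def extract_leading_plain_mentions_py_alt (text : String) : List (List (String × String)) :=
  if pvStartsMention text.toList = true then pvBScan (PySem.Chars.split₀ text.toList) else []

-- ===== PRECONDITION & SPEC =====
def Spec_extract_leading_plain_mentions_py (text : String) (out : List (List (String × String))) : Prop := out = extract_leading_plain_mentions_py_alt text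
instance (text : String) (out : List (List (String × String))) : Decidable (Spec_extract_leading_plain_mentions_py text out) := by unfold Spec_extract_leading_plain_mentions_py; infer_instance

-- ===== CLAIM (what is proved, stated in full; the proofs are below) =====
def Claim_equal_extract_leading_plain_mentions_py : Prop := ∀ (text : String), Dom_extract_leading_plain_mentions_py text → Spec_extract_leading_plain_mentions_py text (extract_leading_plain_mentions_py text)

-- ===== LEMMAS AND PROOFS =====

lemma pvHeadDrop (p : Char → Bool) (l : List Char) (c : Char) (t : List Char)
    (h : List.dropWhile p l = c :: t) : p c = false := by
  have h1 : List.dropWhile p l ≠ [] := by simp [h]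
  have h2 := List.head_dropWhile_not p h1
  simp only [h, List.head_cons] at h2
  simp [h2]

-- functional form of str.split(): words of cs, in order
def pvWords (cs : List Char) : List (List Char) :=
  if h : PySem.Chars.lstrip cs = [] then []
  else
    ((PySem.Chars.lstrip cs).takeWhile (fun c => !PySem.Chars.isspace c)) ::
      pvWords ((PySem.Chars.lstrip cs).dropWhile (fun c => !PySem.Chars.isspace c))
termination_by cs.length
decreasing_by
  cases hl : PySem.Chars.lstrip cs with
  | nil => exact absurd hl h
  | cons c t =>
    have hc : PySem.Chars.isspace c = false := pvHeadDrop _ _ _ _ hl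
    have h1 : (PySem.Chars.lstrip cs).length ≤ cs.length := List.length_dropWhile_le _ _
    rw [hl] at h1
    simp only [List.dropWhile_cons, hc]
    calc (List.dropWhile (fun c => !PySem.Chars.isspace c) t).length
        ≤ t.length := List.length_dropWhile_le _ _
      _ < t.length + 1 := Nat.lt_succ_self _
      _ ≤ cs.length := h1

lemma pvWords_congr (a b : List Char) (h : PySem.Chars.lstrip a = PySem.Chars.lstrip b) :
    pvWords a = pvWords b := by
  conv_lhs => rw [pvWords]
  conv_rhs => rw [pvWords]
  rw [h]

lemma pvWords_nil : pvWords [] = [] := by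
  rw [pvWords]; simp [PySem.Chars.lstrip]


lemma pvLstripIdem (x : List Char) :
    PySem.Chars.lstrip (PySem.Chars.lstrip x) = PySem.Chars.lstrip x := by
  unfold PySem.Chars.lstrip
  cases h : List.dropWhile PySem.Chars.isspace x with
  | nil => rfl
  | cons c t =>
    have hc := pvHeadDrop _ _ _ _ h
    simp [hc]

lemma pvRstripCons (a : Char) (t : List Char) :
    PySem.Chars.rstrip (a :: t) =
      if PySem.Chars.rstrip t = [] then (if PySem.Chars.isspace a then [] else [a])
      else a :: PySem.Chars.rstrip t := by
  unfold PySem.Chars.rstrip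
  rw [List.reverse_cons, List.dropWhile_append]
  by_cases h : List.dropWhile PySem.Chars.isspace t.reverse = []
  · rw [if_pos (by simp [h]), if_pos (by simp [h])]
    by_cases ha : PySem.Chars.isspace a = true
    · simp [ha]
    · simp [ha]
  · rw [if_neg (by simp [h]), if_neg (by simp [h])]
    simp

lemma pvRstripConsNS (a : Char) (t : List Char) (ha : PySem.Chars.isspace a = false) :
    PySem.Chars.rstrip (a :: t) = a :: PySem.Chars.rstrip t := by
  rw [pvRstripCons]
  split_ifs with h2 h3
  · exact absurd h3 (by simp [ha])
  · rw [h2]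
  · rfl

lemma pvTakeRstrip (t : List Char) :
    (PySem.Chars.rstrip t).takeWhile (fun c => !PySem.Chars.isspace c) =
      t.takeWhile (fun c => !PySem.Chars.isspace c) := by
  induction t with
  | nil => rfl
  | cons a t ih =>
    by_cases ha : PySem.Chars.isspace a
    · rw [pvRstripCons]
      split_ifs with h2
      · simp [ha]
      · simp [ha]
    · rw [pvRstripConsNS a t (by simp [ha])]
      simp [ha, ih]

lemma pvDropRstrip (t : List Char) :
    (PySem.Chars.rstrip t).dropWhile (fun c => !PySem.Chars.isspace c) =
      PySem.Chars.rstrip (t.dropWhile (fun c => !PySem.Chars.isspace c)) := by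
  induction t with
  | nil => rfl
  | cons a t ih =>
    by_cases ha : PySem.Chars.isspace a
    · rw [pvRstripCons]
      split_ifs with h2
      · simp only [List.dropWhile_cons, ha]
        simp only [Bool.not_true, Bool.false_eq_true, if_false]
        rw [pvRstripCons]
        simp [h2, ha]
      · simp only [List.dropWhile_cons, ha]
        simp only [Bool.not_true, Bool.false_eq_true, if_false]
        rw [pvRstripCons]
        simp [h2, ha]
    · have ha' : PySem.Chars.isspace a = false := by simp [ha]
      rw [pvRstripConsNS a t ha']
      simp [List.dropWhile_cons, ha', ih]

lemma pvLstripRstrip (t : List Char) :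
    PySem.Chars.lstrip (PySem.Chars.rstrip t) = PySem.Chars.rstrip (PySem.Chars.lstrip t) := by
  induction t with
  | nil => rfl
  | cons a t ih =>
    by_cases ha : PySem.Chars.isspace a
    · rw [pvRstripCons]
      split_ifs with h2
      · have hall : ∀ x ∈ t, PySem.Chars.isspace x = true := by
          have := h2
          unfold PySem.Chars.rstrip at this
          simpa [List.dropWhile_eq_nil_iff] using this
        have hl : PySem.Chars.lstrip t = [] := by
          unfold PySem.Chars.lstrip
          simpa [List.dropWhile_eq_nil_iff] using hall
        simp only [PySem.Chars.lstrip, List.dropWhile_cons, ha, if_pos]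
        unfold PySem.Chars.lstrip at hl
        rw [hl]
        rfl
      · simp only [PySem.Chars.lstrip, List.dropWhile_cons, ha, if_pos] at ih ⊢
        exact ih
    · have ha' : PySem.Chars.isspace a = false := by simp [ha]
      rw [pvRstripConsNS a t ha']
      simp only [PySem.Chars.lstrip, List.dropWhile_cons, ha', Bool.false_eq_true, if_false]
      exact (pvRstripConsNS a t ha').symm

lemma pvWords_rstrip : ∀ (n : Nat) (y : List Char), y.length ≤ n →
    pvWords (PySem.Chars.rstrip y) = pvWords y := by
  intro n
  induction n with
  | zero =>
    intro y hy
    have : y = [] := List.eq_nil_of_length_eq_zero (Nat.le_zero.mp hy)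
    subst this; rfl
  | succ n ih =>
    intro y hy
    conv_lhs => rw [pvWords]
    conv_rhs => rw [pvWords]
    rw [pvLstripRstrip]
    cases hl : PySem.Chars.lstrip y with
    | nil => simp [PySem.Chars.rstrip]
    | cons c t =>
      have hc := pvHeadDrop _ _ _ _ hl
      rw [pvRstripConsNS c t hc]
      rw [dif_neg (List.cons_ne_nil c (PySem.Chars.rstrip t)), dif_neg (List.cons_ne_nil c t)]
      simp only [List.takeWhile_cons, List.dropWhile_cons, hc, Bool.not_false, reduceIte]
      rw [pvTakeRstrip, pvDropRstrip]
      have hlen : (t.dropWhile (fun c => !PySem.Chars.isspace c)).length ≤ n := by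
        have h1 : (PySem.Chars.lstrip y).length ≤ y.length := List.length_dropWhile_le _ _
        rw [hl] at h1
        have h2 : (t.dropWhile (fun c => !PySem.Chars.isspace c)).length ≤ t.length :=
          List.length_dropWhile_le _ _
        simp only [List.length_cons] at h1
        omega
      rw [ih _ hlen]

lemma pvWords_cons_space (c : Char) (rest : List Char) (h : PySem.Chars.isspace c = true) :
    pvWords (c :: rest) = pvWords rest := by
  refine pvWords_congr _ _ ?_
  unfold PySem.Chars.lstrip
  simp [List.dropWhile_cons, h]

lemma pvWords_cons_nonspace (c : Char) (rest : List Char) (h : PySem.Chars.isspace c = false) :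
    pvWords (c :: rest) =
      (c :: rest.takeWhile (fun x => !PySem.Chars.isspace x)) ::
        pvWords (rest.dropWhile (fun x => !PySem.Chars.isspace x)) := by
  have hl : PySem.Chars.lstrip (c :: rest) = c :: rest := by
    unfold PySem.Chars.lstrip
    simp [List.dropWhile_cons, h]
  rw [pvWords, hl, dif_neg (List.cons_ne_nil c rest)]
  simp [List.takeWhile_cons, List.dropWhile_cons, h]

lemma pvSplit0Go (cs : List Char) : ∀ (cur : List Char) (acc : List (List Char)),
    PySem.Chars.split₀.go cs cur acc =
      acc.reverse ++ (if cur.isEmpty then pvWords cs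
        else (cur.reverse ++ cs.takeWhile (fun c => !PySem.Chars.isspace c)) ::
          pvWords (cs.dropWhile (fun c => !PySem.Chars.isspace c))) := by
  induction cs with
  | nil =>
    intro cur acc
    rw [PySem.Chars.split₀.go]
    cases cur <;> simp [pvWords_nil]
  | cons c rest ih =>
    intro cur acc
    rw [PySem.Chars.split₀.go]
    by_cases hsp : PySem.Chars.isspace c = true
    · rw [if_pos hsp]
      cases cur with
      | nil =>
        rw [ih [] acc]
        simp [pvWords_cons_space c rest hsp]
      | cons d ds =>
        rw [if_neg (by simp), ih [] ((d :: ds).reverse :: acc)]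
        simp [List.takeWhile_cons, List.dropWhile_cons, hsp, pvWords_cons_space c rest hsp]
    · have hsp' : PySem.Chars.isspace c = false := by simp [hsp]
      rw [if_neg (by simp [hsp']), ih (c :: cur) acc]
      cases cur with
      | nil =>
        simp [pvWords_cons_nonspace c rest hsp', List.takeWhile_cons, List.dropWhile_cons, hsp']
      | cons d ds =>
        simp [List.takeWhile_cons, List.dropWhile_cons, hsp']

lemma pvSplit0_eq (cs : List Char) : PySem.Chars.split₀ cs = pvWords cs := by
  unfold PySem.Chars.split₀
  rw [pvSplit0Go]
  simp

lemma pvSM_cons (c : Char) (x y : List Char) :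
    pvStartsMention (c :: x) = pvStartsMention (c :: y) := by
  simp [pvStartsMention, PySem.Chars.startswith, List.isPrefixOf]

lemma pvSM_of_at (c : Char) (x : List Char) (hat : c = '@' ∨ c = '＠') :
    pvStartsMention (c :: x) = true := by
  rcases hat with h | h <;> subst h <;> simp [pvStartsMention, PySem.Chars.startswith, List.isPrefixOf]

lemma pvMain : ∀ (n : Nat) (cs : List Char), cs.length ≤ n →
    pvALoop cs = (if pvStartsMention cs = true then pvBScan (pvWords cs) else []) := by
  intro n
  induction n with
  | zero =>
    intro cs h
    have hnil : cs = [] := List.eq_nil_of_length_eq_zero (Nat.le_zero.mp h)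
    subst hnil
    rw [pvALoop, dif_neg (by decide), if_neg (by decide)]
  | succ n ih =>
    intro cs hlen
    by_cases hm : pvStartsMention cs = true
    · cases cs with
      | nil => simp [pvStartsMention, PySem.Chars.startswith] at hm
      | cons c cs' =>
        obtain ⟨hc, hat⟩ := pvStartsMention_head c cs' hm
        rw [pvALoop, dif_pos hm, if_pos hm]
        simp only [pvSplit1_spec c cs' hc]
        rw [pvWords_cons_nonspace c cs' hc]
        have hwr : pvWords (cs'.dropWhile (fun x => !PySem.Chars.isspace x)) =
            pvWords (PySem.Chars.lstrip (cs'.dropWhile (fun x => !PySem.Chars.isspace x))) :=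
          pvWords_congr _ _ (pvLstripIdem _).symm
        by_cases hrn : PySem.Chars.lstrip (cs'.dropWhile (fun x => !PySem.Chars.isspace x)) = []
        · rw [if_pos hrn]
          simp only [List.length_cons, List.length_nil, List.headD_cons, reduceIte]
          rw [hwr, hrn, pvWords_nil]
          simp [pvBScan, pvSM_of_at c _ hat]
        · rw [if_neg hrn]
          simp only [List.length_cons, List.length_singleton, List.headD_cons,
            List.getD_cons_succ, List.getD_cons_zero, Nat.reduceAdd, reduceIte]
          cases hrc : PySem.Chars.lstrip (cs'.dropWhile (fun x => !PySem.Chars.isspace x)) with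
          | nil => exact absurd hrc hrn
          | cons b r' =>
            have hb : PySem.Chars.isspace b = false := pvHeadDrop _ _ _ _ hrc
            have hstrip : PySem.Chars.strip (b :: r') = b :: PySem.Chars.rstrip r' := by
              unfold PySem.Chars.strip
              have : PySem.Chars.lstrip (b :: r') = b :: r' := by
                unfold PySem.Chars.lstrip
                simp [List.dropWhile_cons, hb]
              rw [this, pvRstripConsNS b r' hb]
            have hlen2 : (PySem.Chars.strip (b :: r')).length ≤ n := by
              have h1 := pvStripLen (b :: r')
              have h2 : (PySem.Chars.lstrip (cs'.dropWhile (fun x => !PySem.Chars.isspace x))).length ≤ cs'.length := by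
                calc (PySem.Chars.lstrip (cs'.dropWhile (fun x => !PySem.Chars.isspace x))).length
                    ≤ (cs'.dropWhile (fun x => !PySem.Chars.isspace x)).length := List.length_dropWhile_le _ _
                  _ ≤ cs'.length := List.length_dropWhile_le _ _
              rw [hrc] at h2
              simp only [List.length_cons] at hlen h1 h2 ⊢
              omega
            rw [ih _ hlen2, hstrip]
            rw [hwr, hrc, pvWords_cons_nonspace b r' hb]
            by_cases hbm : pvStartsMention (b :: PySem.Chars.rstrip r') = true
            · rw [if_pos hbm]
              have : pvWords (PySem.Chars.rstrip r') = pvWords r' :=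
                pvWords_rstrip r'.length r' le_rfl
              rw [pvWords_cons_nonspace b (PySem.Chars.rstrip r') hb]
              rw [pvTakeRstrip, pvDropRstrip, pvWords_rstrip _ _ (List.length_dropWhile_le _ _)]
              simp [pvBScan, pvSM_of_at c _ hat,
                (pvSM_cons b (PySem.Chars.rstrip r') (r'.takeWhile (fun x => !PySem.Chars.isspace x))) ▸ hbm]
            · rw [if_neg hbm]
              have hbm2 : pvStartsMention (b :: r'.takeWhile (fun x => !PySem.Chars.isspace x)) = false := by
                rw [pvSM_cons b _ (PySem.Chars.rstrip r')]
                simp [hbm]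
              simp [pvBScan, pvSM_of_at c _ hat, hbm2]
    · rw [pvALoop, dif_neg hm, if_neg hm]

theorem extract_leading_plain_mentions_py_spec : Claim_equal_extract_leading_plain_mentions_py := by
  intro text _
  unfold Spec_extract_leading_plain_mentions_py
  unfold extract_leading_plain_mentions_py extract_leading_plain_mentions_py_alt
  rw [pvMain text.toList.length text.toList le_rfl, pvSplit0_eq]
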